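-- pv_equiv track=rewrite | github.com/baicai-1145/GPT-SoVITS-ANE | GPT_SoVITS/TTS_infer_pack/pause_splitter.py | _get_left_phone_len
-- ===== SOURCE A (Python) =====
-- def _get_left_phone_len(phone_units: list[dict], split_char_index: int) -> int:
--     left_phone_len = 0
--     for unit in phone_units:
--         if int(unit.get("char_end", -1)) <= split_char_index:
--             left_phone_len = int(unit.get("phone_end", left_phone_len))
--         else:
--             break
--     return left_phone_len
-- ===== SOURCE B (Python) =====
-- def _get_left_phone_len(phone_units: list, split_char_index: int) -> int:
--     # two-pass: take the qualifying prefix, then pick the last unit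
--     # in it that actually carries a "phone_end" key.
--     n = 0
--     while n < len(phone_units) and int(phone_units[n].get("char_end", -1)) <= split_char_index:
--         n += 1
--     for unit in reversed(phone_units[:n]):
--         if "phone_end" in unit:
--             return int(unit["phone_end"])
--     return 0
-- ===== Notes on version B (the rewrite author's own statement) =====
-- stated objective: alternative
-- what changed: Replaces A's single accumulating loop with a two-pass shape: first take the qualifying prefix (char_end <= split_char_index), then scan it in reverse and return the phone_end of the first unit carrying that key, defaulting to 0.
import Mathlib
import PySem

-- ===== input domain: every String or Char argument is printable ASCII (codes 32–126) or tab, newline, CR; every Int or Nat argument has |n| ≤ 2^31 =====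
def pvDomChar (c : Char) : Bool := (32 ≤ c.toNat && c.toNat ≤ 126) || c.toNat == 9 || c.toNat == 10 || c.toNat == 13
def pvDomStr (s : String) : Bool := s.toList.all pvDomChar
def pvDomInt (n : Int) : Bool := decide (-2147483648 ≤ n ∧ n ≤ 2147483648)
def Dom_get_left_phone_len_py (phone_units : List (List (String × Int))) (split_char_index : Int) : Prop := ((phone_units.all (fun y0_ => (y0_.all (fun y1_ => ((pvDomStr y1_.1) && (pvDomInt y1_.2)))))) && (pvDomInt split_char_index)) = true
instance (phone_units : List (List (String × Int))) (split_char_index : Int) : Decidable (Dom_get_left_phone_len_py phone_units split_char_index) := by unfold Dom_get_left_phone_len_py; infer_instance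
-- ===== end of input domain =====

-- ===== PORT A =====
-- B restructures A's single accumulating loop into take-prefix-then-reverse-search (alternative decomposition, same cost).
-- dict.get(k, d) on the assoc-list model: value of the first pair with key k, else d (exact for Python dicts, whose keys are unique)
def pvGetD (u : List (String × Int)) (k : String) (d : Int) : Int :=
  match u.find? (fun p => p.1 == k) with
  | some p => p.2
  | none => d

-- the for-loop of A with its accumulator left_phone_len; break = return acc
def pvALoop (split_char_index : Int) : List (List (String × Int)) → Int → Int
  | [], acc => acc
  | u :: rest, acc =>
      if pvGetD u "char_end" (-1) ≤ split_char_index then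
        pvALoop split_char_index rest (pvGetD u "phone_end" acc)
      else acc

def get_left_phone_len_py (phone_units : List (List (String × Int))) (split_char_index : Int) : Int :=
  pvALoop split_char_index phone_units 0

-- ===== PORT B =====
-- '"phone_end" in unit' on the assoc-list model
def pvHasKey (u : List (String × Int)) (k : String) : Bool :=
  (u.find? (fun p => p.1 == k)).isSome

-- Source B: count the qualifying prefix (while loop + slice = takeWhile), then scan it reversed for the first key-bearing unit
def get_left_phone_len_py_alt (phone_units : List (List (String × Int))) (split_char_index : Int) : Int :=
  let pre := phone_units.takeWhile (fun u => decide (pvGetD u "char_end" (-1) ≤ split_char_index))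
  match pre.reverse.find? (fun u => pvHasKey u "phone_end") with
  | some u => pvGetD u "phone_end" 0
  | none => 0

-- ===== PRECONDITION & SPEC =====
def Spec_get_left_phone_len_py (phone_units : List (List (String × Int))) (split_char_index : Int) (out : Int) : Prop := out = get_left_phone_len_py_alt phone_units split_char_index
instance (phone_units : List (List (String × Int))) (split_char_index : Int) (out : Int) : Decidable (Spec_get_left_phone_len_py phone_units split_char_index out) := by unfold Spec_get_left_phone_len_py; infer_instance

-- ===== CLAIM (what is proved, stated in full; the proofs are below) =====
def Claim_equal_get_left_phone_len_py : Prop := ∀ (phone_units : List (List (String × Int))) (split_char_index : Int), Dom_get_left_phone_len_py phone_units split_char_index → Spec_get_left_phone_len_py phone_units split_char_index (get_left_phone_len_py phone_units split_char_index)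

-- ===== LEMMAS AND PROOFS =====
theorem pvGetD_of_hasKey (u : List (String × Int)) (k : String) (a b : Int)
    (h : pvHasKey u k = true) : pvGetD u k a = pvGetD u k b := by
  unfold pvHasKey at h
  unfold pvGetD
  cases hf : u.find? (fun p => p.1 == k) with
  | none => rw [hf] at h; simp at h
  | some p => rfl

theorem pvGetD_of_not_hasKey (u : List (String × Int)) (k : String) (a : Int)
    (h : pvHasKey u k = false) : pvGetD u k a = a := by
  unfold pvHasKey at h
  unfold pvGetD
  cases hf : u.find? (fun p => p.1 == k) with
  | none => rfl
  | some p => rw [hf] at h; simp at h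

theorem pvALoop_eq (split_char_index : Int) (phone_units : List (List (String × Int))) :
    ∀ acc : Int, pvALoop split_char_index phone_units acc =
      match (phone_units.takeWhile
              (fun u => decide (pvGetD u "char_end" (-1) ≤ split_char_index))).reverse.find?
              (fun u => pvHasKey u "phone_end") with
      | some u => pvGetD u "phone_end" 0
      | none => acc := by
  induction phone_units with
  | nil => intro acc; simp [pvALoop]
  | cons u rest ih =>
    intro acc
    by_cases h : pvGetD u "char_end" (-1) ≤ split_char_index
    · rw [List.takeWhile_cons]
      simp only [h, decide_true, if_true]
      rw [pvALoop, if_pos h, ih, List.reverse_cons, List.find?_append]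
      cases hf : (rest.takeWhile
          (fun u => decide (pvGetD u "char_end" (-1) ≤ split_char_index))).reverse.find?
          (fun u => pvHasKey u "phone_end") with
      | some v => simp
      | none =>
        cases hq : pvHasKey u "phone_end" with
        | true => simp [List.find?, hq, pvGetD_of_hasKey u "phone_end" acc 0 hq]
        | false => simp [List.find?, hq, pvGetD_of_not_hasKey u "phone_end" acc hq]
    · rw [List.takeWhile_cons]
      simp only [h, decide_false]
      rw [pvALoop, if_neg h]
      simp

-- ===== VERDICT (by name: the statement is the Claim_ definition above) =====
theorem get_left_phone_len_py_spec : Claim_equal_get_left_phone_len_py := by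
  intro phone_units split_char_index _
  unfold Spec_get_left_phone_len_py get_left_phone_len_py get_left_phone_len_py_alt
  rw [pvALoop_eq]
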